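-- pv_equiv track=rewrite | github.com/Kasenhova67/353504_GUSENTSOVA_09 | IGI/LR3/lab3/task4.py | count_vowel_words
-- ===== SOURCE A (Python) =====
-- def count_vowel_words(text):
--
--     """
--     Counts words starting/ending with vowels (a,e,i,o,u,y).
--
--     Args:
--         text: Input string to analyze
--
--     Returns:
--         Count of words that start or end with vowels
--
--     Note:
--         Case-insensitive matching
--     """
--
--     letters = "aeuiyoAEIUYO"
--     words = text.split()
--     n_start = 0
--     n_end = 0
--     both = 0
--
--     for word in words:
--          if word[0] in letters:
--              n_start += 1
--          if word[-1] in letters: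
--              n_end += 1
--          if word[0] in letters and word[-1] in letters:
--              both += 1
--     n = n_start + n_end - both
--     return n
-- ===== SOURCE B (Python) =====
-- def count_vowel_words(text):
--     """Counts words starting or ending with vowels (a,e,i,o,u,y); case-insensitive."""
--     letters = "aeuiyoAEIUYO"
--     return sum(1 for word in text.split()
--                if word[0] in letters or word[-1] in letters)
-- ===== Notes on version B (the rewrite author's own statement) =====
-- stated objective: simpler
-- what changed: Replaces the three-counter inclusion-exclusion scheme (n_start + n_end - both) with a single direct count of words whose first OR last character is a vowel.
import Mathlib
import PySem

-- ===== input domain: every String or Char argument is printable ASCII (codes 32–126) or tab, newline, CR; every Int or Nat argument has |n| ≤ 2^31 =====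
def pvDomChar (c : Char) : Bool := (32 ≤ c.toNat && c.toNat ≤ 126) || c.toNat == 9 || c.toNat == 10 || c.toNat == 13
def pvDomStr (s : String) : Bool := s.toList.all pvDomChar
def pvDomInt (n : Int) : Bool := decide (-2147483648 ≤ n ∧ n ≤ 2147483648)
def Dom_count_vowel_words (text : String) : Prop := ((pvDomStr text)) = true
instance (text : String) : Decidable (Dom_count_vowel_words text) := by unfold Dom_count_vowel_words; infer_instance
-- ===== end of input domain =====

-- B replaces A's three-counter inclusion-exclusion (n_start + n_end - both) with a single
-- direct count of words whose first OR last character is a vowel (objective: simpler).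

-- ===== PORT A =====
-- 'word[0] in letters' on a 1-char string equals char membership in letters' chars (exact here)
def cvwStart (w : String) : Bool :=
  (PySem.Str.pyGet? w 0).elim false (fun c => ("aeuiyoAEIUYO".toList).contains c)

def cvwEnd (w : String) : Bool :=
  (PySem.Str.pyGet? w (-1)).elim false (fun c => ("aeuiyoAEIUYO".toList).contains c)

def count_vowel_words (text : String) : Int :=
  let words := PySem.Str.split₀ text
  let r : Int × Int × Int := words.foldl
    (fun (s : Int × Int × Int) word =>
      let n_start := if cvwStart word then s.1 + 1 else s.1
      let n_end := if cvwEnd word then s.2.1 + 1 else s.2.1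
      let both := if cvwStart word && cvwEnd word then s.2.2 + 1 else s.2.2
      (n_start, n_end, both)) (0, 0, 0)
  r.1 + r.2.1 - r.2.2

-- ===== PORT B =====
def cvwHit (word : String) : Bool := cvwStart word || cvwEnd word

def count_vowel_words_alt (text : String) : Int :=
  ((PySem.Str.split₀ text).countP cvwHit : Nat)

-- ===== PRECONDITION & SPEC =====
def Spec_count_vowel_words (text : String) (out : Int) : Prop := out = count_vowel_words_alt text
instance (text : String) (out : Int) : Decidable (Spec_count_vowel_words text out) := by unfold Spec_count_vowel_words; infer_instance

-- ===== CLAIM (what is proved, stated in full; the proofs are below) =====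
def Claim_equal_count_vowel_words : Prop := ∀ (text : String), Dom_count_vowel_words text → Spec_count_vowel_words text (count_vowel_words text)

-- ===== LEMMAS AND PROOFS =====
theorem cvw_fold (ws : List String) (a b c : Int) :
    (ws.foldl
      (fun (s : Int × Int × Int) word =>
        let n_start := if cvwStart word then s.1 + 1 else s.1
        let n_end := if cvwEnd word then s.2.1 + 1 else s.2.1
        let both := if cvwStart word && cvwEnd word then s.2.2 + 1 else s.2.2
        (n_start, n_end, both)) (a, b, c)) =
      (fun r : Int × Int × Int => (r.1 + a, r.2.1 + b, r.2.2 + c))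
        (ws.foldl
          (fun (s : Int × Int × Int) word =>
            let n_start := if cvwStart word then s.1 + 1 else s.1
            let n_end := if cvwEnd word then s.2.1 + 1 else s.2.1
            let both := if cvwStart word && cvwEnd word then s.2.2 + 1 else s.2.2
            (n_start, n_end, both)) (0, 0, 0)) := by
  induction ws generalizing a b c with
  | nil => simp
  | cons w ws ih =>
    simp only [List.foldl_cons]
    rw [ih, ih (if cvwStart w then 0 + 1 else 0) _ _]
    cases hs : cvwStart w <;> cases he : cvwEnd w <;>
      simp [hs, he, Prod.ext_iff] <;> omega

theorem cvw_main (ws : List String) :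
    (ws.foldl
      (fun (s : Int × Int × Int) word =>
        let n_start := if cvwStart word then s.1 + 1 else s.1
        let n_end := if cvwEnd word then s.2.1 + 1 else s.2.1
        let both := if cvwStart word && cvwEnd word then s.2.2 + 1 else s.2.2
        (n_start, n_end, both)) (0, 0, 0) |>
      (fun r : Int × Int × Int => r.1 + r.2.1 - r.2.2)) = ((ws.countP cvwHit : Nat) : Int) := by
  induction ws with
  | nil => simp
  | cons w ws ih =>
    simp only [List.foldl_cons, List.countP_cons]
    rw [cvw_fold]
    cases hs : cvwStart w <;> cases he : cvwEnd w <;>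
      simp [hs, he, cvwHit] at ih ⊢ <;> omega

-- ===== VERDICT (by name: the statement is the Claim_ definition above) =====
theorem count_vowel_words_spec : Claim_equal_count_vowel_words := by
  intro text _
  unfold Spec_count_vowel_words count_vowel_words count_vowel_words_alt
  simpa using cvw_main (PySem.Str.split₀ text)
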